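-- pv_equiv track=rewrite | github.com/nroad-gith-admin/document-extraction | src/tabular_data_extraction/format2/quantifyData3.py | df_to_list
-- ===== SOURCE A (Python) =====
-- def df_to_list( df):
--     newli = []
--     for di in list(df):
--         di = str(di)
--         if '\n' in di:
--             newli.extend(di.split('\n'))
--         else:
--             newli.append(di)
--
--     return newli
-- ===== SOURCE B (Python) =====
-- def df_to_list(df):
--     parts = [str(di) for di in df]
--     if not parts:
--         return []
--     return '\n'.join(parts).split('\n')
-- ===== Notes on version B (the rewrite author's own statement) =====
-- stated objective: idiomatic
-- what changed: Instead of a per-element branch (membership test, then split-and-extend or append), B joins all items with newlines and does one global split, guarding the empty input where the join-then-split path would yield a single empty string.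
import Mathlib
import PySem

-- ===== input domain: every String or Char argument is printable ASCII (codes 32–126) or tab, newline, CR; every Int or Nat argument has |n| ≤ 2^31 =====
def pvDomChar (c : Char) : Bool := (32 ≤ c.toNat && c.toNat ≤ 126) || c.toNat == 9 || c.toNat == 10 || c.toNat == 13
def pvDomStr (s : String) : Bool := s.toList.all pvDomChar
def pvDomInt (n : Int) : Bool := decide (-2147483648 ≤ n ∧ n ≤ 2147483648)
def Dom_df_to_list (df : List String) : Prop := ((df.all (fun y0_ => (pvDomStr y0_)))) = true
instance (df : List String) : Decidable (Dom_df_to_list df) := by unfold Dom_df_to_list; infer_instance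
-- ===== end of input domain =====

-- B joins all items with '\n' and does ONE global split (with an empty-list guard) instead of A's per-element membership test and branch; same return value, same cost.

-- s.split(sep) for the nonempty literal sep both Pythons use (Python split with sep ≠ '')
def pySplit (s sep : String) : List String :=
  (PySem.Chars.splitOn s.toList sep.toList).map String.ofList

-- ===== PORT A =====
def df_to_list (df : List String) : List String :=
  df.foldl (fun newli di =>
    if PySem.Str.isIn "\n" di then newli ++ pySplit di "\n"
    else newli ++ [di]) []

-- ===== PORT B =====
def df_to_list_alt (df : List String) : List String :=
  let parts := df.map (fun di => di)
  if parts.isEmpty then []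
  else pySplit (PySem.Str.join "\n" parts) "\n"

-- ===== PRECONDITION & SPEC =====
def Spec_df_to_list (df : List String) (out : List String) : Prop := out = df_to_list_alt df
instance (df : List String) (out : List String) : Decidable (Spec_df_to_list df out) := by unfold Spec_df_to_list; infer_instance

-- ===== CLAIM (what is proved, stated in full; the proofs are below) =====
def Claim_equal_df_to_list : Prop := ∀ (df : List String), Dom_df_to_list df → Spec_df_to_list df (df_to_list df)

-- ===== LEMMAS AND PROOFS =====

theorem modifyHead_id' {α : Type} (l : List α) : List.modifyHead (fun x => x) l = l := by
  cases l <;> rfl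

-- PySem's fuel-based splitOn.go with a single-character separator, characterised by List.splitOn
theorem go_single (c : Char) : ∀ (l : List Char) (fuel : Nat), l.length ≤ fuel →
    ∀ (cur : List Char) (acc : List (List Char)),
    PySem.Chars.splitOn.go [c] fuel l cur acc
      = acc.reverse ++ (l.splitOn c).modifyHead (cur.reverse ++ ·) := by
  intro l
  induction l with
  | nil =>
    intro fuel _ cur acc
    cases fuel <;> simp [PySem.Chars.splitOn.go, List.splitOn]
  | cons c' rest ih =>
    intro fuel hf cur acc
    cases fuel with
    | zero => simp at hf
    | succ f =>
      rw [PySem.Chars.splitOn.go]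
      by_cases h : c' = c
      · subst h
        simp only [List.isPrefixOf, beq_self_eq_true, Bool.true_and, if_true,
          List.length_singleton, List.drop_one, List.tail_cons]
        rw [ih f (by simpa using hf)]
        simp [List.splitOn, List.splitOnP_cons, modifyHead_id']
      · have hp : ([c].isPrefixOf (c' :: rest)) = false := by
          simp [List.isPrefixOf]; exact fun hh => (h hh.symm).elim
        rw [if_neg (by simp [hp])]
        rw [ih f (by simpa using hf)]
        simp only [List.splitOn, List.splitOnP_cons, beq_iff_eq, h, if_false,
          List.modifyHead_modifyHead]
        have hfun : (fun x => (c' :: cur).reverse ++ x)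
            = ((fun x : List Char => cur.reverse ++ x) ∘ List.cons c') := by
          funext x; simp
        rw [hfun]

theorem splitOn_single (c : Char) (s : List Char) :
    PySem.Chars.splitOn s [c] = s.splitOn c := by
  rw [PySem.Chars.splitOn, go_single c s (s.length + 1) (by omega)]
  simp [modifyHead_id']

-- splitting a '\n'-join of a NONEMPTY list of pieces = concatenating the per-piece splits
theorem split_join (c : Char) : ∀ (p : List Char) (ps : List (List Char)),
    (PySem.Chars.join [c] (p :: ps)).splitOn c = (p :: ps).flatMap (·.splitOn c) := by
  intro p ps
  induction ps generalizing p with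
  | nil => simp [PySem.Chars.join, List.intercalate]
  | cons q qs ih =>
    have hj : PySem.Chars.join [c] (p :: q :: qs) = p ++ c :: PySem.Chars.join [c] (q :: qs) := by
      simp [PySem.Chars.join, List.intercalate]
    rw [hj]
    show List.splitOnP _ _ = _
    rw [List.splitOnP_append_cons _ _ _ c (by simp)]
    have := ih q
    simp only [List.splitOn] at this ⊢
    rw [this]
    simp

theorem pySplit_nl (di : String) :
    pySplit di "\n" = (di.toList.splitOn '\n').map String.ofList := by
  rw [pySplit]
  rw [show ("\n" : String).toList = ['\n'] from rfl, splitOn_single]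

-- A's branch is split-and-extend in both cases: with no '\n' present, split returns the item alone
theorem branch_eq (newli : List String) (di : String) :
    (if PySem.Str.isIn "\n" di then newli ++ pySplit di "\n" else newli ++ [di])
      = newli ++ pySplit di "\n" := by
  split_ifs with h
  · rfl
  · have hninf : ¬ (("\n" : String).toList <:+: di.toList) := by
      intro hinf
      exact h ((PySem.Str.isIn_iff_infix _ _).mpr hinf)
    have hnm : '\n' ∉ di.toList := by
      intro hm
      exact hninf ((List.singleton_infix_iff _ _).mpr hm)
    rw [pySplit_nl, List.splitOn, List.splitOnP_eq_single _ _ (by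
      intro x hx
      simp only [beq_iff_eq]
      intro he
      exact hnm (he ▸ hx))]
    simp

-- ===== VERDICT (by name: the statement is the Claim_ definition above) =====
theorem df_to_list_spec : Claim_equal_df_to_list := by
  intro df _
  unfold Spec_df_to_list df_to_list df_to_list_alt
  have hfold : df.foldl (fun newli di =>
      if PySem.Str.isIn "\n" di then newli ++ pySplit di "\n" else newli ++ [di]) []
      = df.foldl (fun newli di => newli ++ pySplit di "\n") [] := by
    congr 1
    funext newli di
    exact branch_eq newli di
  rw [hfold, PySem.List.foldl_append_eq_flatMap]
  cases df with
  | nil => simp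
  | cons p ps =>
    simp only [List.map_id_fun', id_eq, List.isEmpty_cons, Bool.false_eq_true, if_false]
    rw [pySplit_nl, PySem.Str.join]
    rw [show (String.ofList (PySem.Chars.join "\n".toList (List.map String.toList (p :: ps)))).toList
        = PySem.Chars.join ['\n'] (List.map String.toList (p :: ps)) from by
      simp [String.toList_ofList]]
    rw [show List.map String.toList (p :: ps) = p.toList :: ps.map String.toList from rfl]
    rw [split_join]
    simp only [List.nil_append, List.map_flatMap]
    rw [show p.toList :: List.map String.toList ps = (p :: ps).map String.toList from rfl,
      List.flatMap_map]
    congr 1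
    funext di
    rw [pySplit_nl]
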